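-- pv_equiv track=rewrite | github.com/arslanbasharat-o-o/inventory-Sku-Parser | backend/sku_intelligence_engine.py | _detect_backdoor_camera_lens
-- ===== SOURCE A (Python) =====
-- def _detect_backdoor_camera_lens(normalized_title: str) -> bool:
--     """Return True if the title mentions a camera lens as part of a back door."""
--     lens_indicators = [
--         "with camera lens", "with cam lens", "with lens", "camera lens included",
--         "incl camera lens", "+ camera lens", "+ lens", "with camera glass",
--         "and camera lens", "& camera lens", "camera lens", "lens cover",
--         "camera lens cover", "lens glass", "camera lens glass", "camera glass",
--     ]
--     for indicator in lens_indicators: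
--         if indicator in normalized_title:
--             return True
--     return False
-- ===== SOURCE B (Python) =====
-- def _detect_backdoor_camera_lens(normalized_title: str) -> bool:
--     """Return True if the title mentions a camera lens as part of a back door."""
--     # Minimal phrase set: every longer indicator phrase already contains one of
--     # these, so checking them alone decides the match.
--     phrases = ("with cam lens", "with lens", "+ lens", "camera lens",
--                "lens cover", "lens glass", "camera glass")
--     # Single left-to-right sweep: at each position, test whether any phrase starts there.
--     return any(normalized_title.startswith(p, i)
--                for i in range(len(normalized_title) + 1)
--                for p in phrases)
-- ===== Notes on version B (the rewrite author's own statement) =====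
-- stated objective: alternative
-- what changed: B replaces A's 16 independent substring-containment scans with one left-to-right sweep over positions of the title, testing at each position whether any phrase of a pruned 7-phrase minimal set starts there (every indicator of A's list contains a minimal phrase, proved in Lean).
import Mathlib
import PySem

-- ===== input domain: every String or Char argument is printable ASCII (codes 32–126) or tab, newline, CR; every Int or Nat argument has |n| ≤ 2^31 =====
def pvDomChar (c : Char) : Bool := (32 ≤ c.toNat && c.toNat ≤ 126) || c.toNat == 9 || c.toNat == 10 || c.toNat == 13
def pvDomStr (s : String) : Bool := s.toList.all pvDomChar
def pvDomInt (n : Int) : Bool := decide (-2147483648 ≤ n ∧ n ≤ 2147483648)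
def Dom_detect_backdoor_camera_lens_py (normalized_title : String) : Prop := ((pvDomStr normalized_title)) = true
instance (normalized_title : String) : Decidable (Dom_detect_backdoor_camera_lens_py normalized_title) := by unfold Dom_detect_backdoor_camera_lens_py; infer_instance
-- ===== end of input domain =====

-- B sweeps the title position by position against a pruned 7-phrase minimal set
-- instead of A's 16 separate containment scans (alternative decomposition, same result).

-- ===== PORT A =====
def pvLensIndicators : List String :=
  ["with camera lens", "with cam lens", "with lens", "camera lens included",
   "incl camera lens", "+ camera lens", "+ lens", "with camera glass",
   "and camera lens", "& camera lens", "camera lens", "lens cover",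
   "camera lens cover", "lens glass", "camera lens glass", "camera glass"]

-- for-loop with early 'return True' over the indicator list = List.any of 'indicator in title'
def detect_backdoor_camera_lens_py (normalized_title : String) : Bool :=
  pvLensIndicators.any (fun ind => PySem.Str.isIn ind normalized_title)

-- ===== PORT B =====
def pvMinimalIndicators : List String :=
  ["with cam lens", "with lens", "+ lens", "camera lens",
   "lens cover", "lens glass", "camera glass"]

-- Source B's any-comprehension: for i in range(len(title)+1), for p in phrases,
-- title.startswith(p, i); startswith with start index i ≥ 0 = prefix of (drop i)
def detect_backdoor_camera_lens_py_alt (normalized_title : String) : Bool :=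
  (List.range (normalized_title.toList.length + 1)).any (fun i =>
    pvMinimalIndicators.any (fun p =>
      PySem.Chars.startswith (normalized_title.toList.drop i) p.toList))

-- ===== PRECONDITION & SPEC =====
def Spec_detect_backdoor_camera_lens_py (normalized_title : String) (out : Bool) : Prop := out = detect_backdoor_camera_lens_py_alt normalized_title
instance (normalized_title : String) (out : Bool) : Decidable (Spec_detect_backdoor_camera_lens_py normalized_title out) := by unfold Spec_detect_backdoor_camera_lens_py; infer_instance

-- ===== CLAIM (what is proved, stated in full; the proofs are below) =====
def Claim_equal_detect_backdoor_camera_lens_py : Prop := ∀ (normalized_title : String), Dom_detect_backdoor_camera_lens_py normalized_title → Spec_detect_backdoor_camera_lens_py normalized_title (detect_backdoor_camera_lens_py normalized_title)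

-- ===== LEMMAS AND PROOFS =====

-- infix = prefix of some suffix (drop i with i ≤ length)
theorem pvInfix_iff_drop (p cs : List Char) :
    p <:+: cs ↔ ∃ i < cs.length + 1, p <+: cs.drop i := by
  constructor
  · rintro ⟨s, t, rfl⟩
    exact ⟨s.length, by simp, by simp⟩
  · rintro ⟨i, _, hpre⟩
    exact hpre.isInfix.trans (List.drop_suffix i cs).isInfix

-- B's position sweep finds exactly the minimal phrases occurring as substrings
theorem pvAlt_iff (t : String) :
    detect_backdoor_camera_lens_py_alt t = true ↔
    ∃ p ∈ pvMinimalIndicators, p.toList <:+: t.toList := by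
  unfold detect_backdoor_camera_lens_py_alt
  simp only [List.any_eq_true, List.mem_range, PySem.Chars.startswith_iff]
  constructor
  · rintro ⟨i, hi, p, hp, hpre⟩
    exact ⟨p, hp, (pvInfix_iff_drop _ _).mpr ⟨i, hi, hpre⟩⟩
  · rintro ⟨p, hp, hinf⟩
    obtain ⟨i, hi, hpre⟩ := (pvInfix_iff_drop _ _).mp hinf
    exact ⟨i, hi, p, hp, hpre⟩

-- every indicator of A's list contains a minimal phrase
theorem pvFull_has_minimal :
    ∀ p ∈ pvLensIndicators, ∃ q ∈ pvMinimalIndicators, q.toList <:+: p.toList := by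
  decide

theorem pvPrune (cs : List Char) :
    (∃ p ∈ pvLensIndicators, p.toList <:+: cs) ↔
    (∃ q ∈ pvMinimalIndicators, q.toList <:+: cs) := by
  constructor
  · rintro ⟨p, hp, hinf⟩
    obtain ⟨q, hq, hqp⟩ := pvFull_has_minimal p hp
    exact ⟨q, hq, hqp.trans hinf⟩
  · rintro ⟨q, hq, hinf⟩
    have hmem : q ∈ pvLensIndicators := by fin_cases hq <;> decide
    exact ⟨q, hmem, hinf⟩

-- ===== VERDICT (by name: the statement is the Claim_ definition above) =====
theorem detect_backdoor_camera_lens_py_spec : Claim_equal_detect_backdoor_camera_lens_py := by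
  intro t _
  unfold Spec_detect_backdoor_camera_lens_py
  rw [Bool.eq_iff_iff]
  rw [pvAlt_iff]
  unfold detect_backdoor_camera_lens_py
  simp only [List.any_eq_true, PySem.Str.isIn_eq, PySem.Chars.isIn_iff_infix]
  exact pvPrune t.toList
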